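-- pv_equiv track=rewrite | github.com/HikFanghe/SPEC_Tool | lib/mtd_com_fun.py | get_stream_supportChannelNum
-- ===== SOURCE A (Python) =====
-- def get_stream_supportChannelNum(a_list):
--     '''获取码流ID'''
--     one_list = 0
--     two_list = 0
--     three_list = 0
--     four_list = 0
--     five_list = 0
--     # a_list = ["101", "102", "103", "104", "105", "201", "202", "203", "204"]
--     for item in a_list:
--         if "1" in item.split("0")[1]:
--             one_list += 1
--         if "2" in item.split("0")[1]:
--             two_list += 1
--         if "3" in item.split("0")[1]:
--             three_list += 1
--         if "4" in item.split("0")[1]: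
--             four_list += 1
--         if "5" in item.split("0")[1]:
--             five_list += 1
--     return {
--         "1": one_list,
--         "2": two_list,
--         "3": three_list,
--         "4": four_list,
--         "5": five_list
--     }
-- ===== SOURCE B (Python) =====
-- def get_stream_supportChannelNum(a_list):
--     '''获取码流ID'''
--     cnt = {}
--     for item in a_list:
--         for ch in set(item.split("0")[1]):
--             if ch in "12345":
--                 cnt[ch] = cnt.get(ch, 0) + 1
--     return {d: cnt.get(d, 0) for d in "12345"}
-- ===== Notes on version B (the rewrite author's own statement) =====
-- stated objective: alternative
-- what changed: Instead of five unrolled per-item membership tests feeding five counters, B builds one frequency dictionary by scanning the distinct characters of each item's split('0')[1] part (incrementing a count per digit character found), then reads the five digit counts out of that dictionary.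
import Mathlib
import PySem

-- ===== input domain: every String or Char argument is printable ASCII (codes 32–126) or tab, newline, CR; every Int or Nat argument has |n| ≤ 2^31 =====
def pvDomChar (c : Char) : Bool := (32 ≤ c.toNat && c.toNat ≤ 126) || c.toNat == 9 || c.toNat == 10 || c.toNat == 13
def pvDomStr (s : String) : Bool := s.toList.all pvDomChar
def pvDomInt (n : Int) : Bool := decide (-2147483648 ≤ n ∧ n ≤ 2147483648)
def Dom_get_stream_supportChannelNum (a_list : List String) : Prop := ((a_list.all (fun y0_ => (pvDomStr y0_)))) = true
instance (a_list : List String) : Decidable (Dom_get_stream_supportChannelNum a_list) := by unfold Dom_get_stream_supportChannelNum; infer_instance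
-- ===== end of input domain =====

-- ===== PORT A =====
-- B replaces A's five unrolled counters by one frequency dictionary built from the
-- distinct digit characters of each item's part; return values only, no mutation.

-- item.split("0")[1]  (Python raises IndexError when item contains no '0'; Pre_ excludes that)
def pvChanPart (item : String) : String :=
  PySem.List.pyGetD ((PySem.Str.split? item "0").getD []) 1 ""

-- single pass keeping five counters, then the literal dict
def get_stream_supportChannelNum (a_list : List String) : List (String × Int) :=
  let s := a_list.foldl
    (fun (c : Int × Int × Int × Int × Int) item =>
      let p := pvChanPart item
      (c.1 + (if PySem.Str.isIn "1" p then 1 else 0),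
       c.2.1 + (if PySem.Str.isIn "2" p then 1 else 0),
       c.2.2.1 + (if PySem.Str.isIn "3" p then 1 else 0),
       c.2.2.2.1 + (if PySem.Str.isIn "4" p then 1 else 0),
       c.2.2.2.2 + (if PySem.Str.isIn "5" p then 1 else 0)))
    (0, 0, 0, 0, 0)
  [("1", s.1), ("2", s.2.1), ("3", s.2.2.1), ("4", s.2.2.2.1), ("5", s.2.2.2.2)]

-- ===== PORT B =====
-- cnt = {}; for item: for ch in set(item.split("0")[1]):
--   if ch in "12345": cnt[ch] = cnt.get(ch, 0) + 1
-- return {d: cnt.get(d, 0) for d in "12345"}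
-- ('ch in "12345"' for a one-char ch is exactly char membership; the set's hash iteration
--  order is consumed only by building a Dict later looked up, so any order is exact;
--  the final dict's value counts are order-independent.)
-- the characters of "12345", as the char list "12345".toList reduces to
def pvDigits : List Char := ['1', '2', '3', '4', '5']

def get_stream_supportChannelNum_alt (a_list : List String) : List (String × Int) :=
  let cnt : PySem.Dict Char Int := a_list.foldl
    (fun d item =>
      (PySem.Set.ofList (pvChanPart item).toList).foldl
        (fun d ch =>
          if pvDigits.contains ch then d.modify ch 0 (· + 1) else d) d)
    PySem.Dict.empty
  pvDigits.map (fun c => (String.ofList [c], cnt.getD c 0))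

-- ===== PRECONDITION & SPEC =====
-- Python A (and B) raise IndexError on any item without a '0' (split("0") yields one piece).
def Pre_get_stream_supportChannelNum (a_list : List String) : Prop :=
  ∀ item ∈ a_list, '0' ∈ item.toList
instance (a_list : List String) : Decidable (Pre_get_stream_supportChannelNum a_list) := by
  unfold Pre_get_stream_supportChannelNum; infer_instance
def pvWitness_get_stream_supportChannelNum : List String := ["101", "202", "105"]

def Spec_get_stream_supportChannelNum (a_list : List String) (out : List (String × Int)) : Prop := out = get_stream_supportChannelNum_alt a_list
instance (a_list : List String) (out : List (String × Int)) : Decidable (Spec_get_stream_supportChannelNum a_list out) := by unfold Spec_get_stream_supportChannelNum; infer_instance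

-- ===== CLAIM (what is proved, stated in full; the proofs are below) =====
def Claim_equal_get_stream_supportChannelNum : Prop := ∀ (a_list : List String), Dom_get_stream_supportChannelNum a_list → Pre_get_stream_supportChannelNum a_list → Spec_get_stream_supportChannelNum a_list (get_stream_supportChannelNum a_list)

-- ===== LEMMAS AND PROOFS =====

-- "d" (one char c) occurs in part  ↔  c is a member of its char list
lemma pvIsIn_single (c : Char) (s : String) :
    PySem.Str.isIn (String.ofList [c]) s = s.toList.contains c := by
  rcases h : s.toList.contains c with _ | _
  · simp only [List.contains_eq_mem, decide_eq_false_iff_not] at h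
    rw [Bool.eq_false_iff]
    intro hi
    have hlist : (String.ofList [c]).toList = [c] := by simp
    have := (PySem.Str.isIn_iff_infix _ _).mp hi
    rw [hlist] at this
    exact h ((List.singleton_infix_iff c s.toList).mp this)
  · simp only [List.contains_eq_mem, decide_eq_true_eq] at h
    apply (PySem.Str.isIn_iff_infix _ _).mpr
    rw [show (String.ofList [c]).toList = [c] by simp]
    exact (List.singleton_infix_iff c s.toList).mpr h

-- one item's inner loop adds 1 to digit c's count iff c occurs in the part
lemma pvInner_getD (c : Char) (hc : pvDigits.contains c = true)
    (d : PySem.Dict Char Int) (item : String) :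
    ((PySem.Set.ofList (pvChanPart item).toList).foldl
        (fun d ch =>
          if pvDigits.contains ch then d.modify ch 0 (· + 1) else d) d).getD c 0
      = d.getD c 0 + (if (pvChanPart item).toList.contains c then 1 else 0) := by
  rw [PySem.List.foldl_if_eq_foldl_filter]
  rw [PySem.Dict.getD_foldl_modify_add_one]
  congr 1
  rcases hm : (pvChanPart item).toList.contains c with _ | _
  · have hm' : c ∉ (pvChanPart item).toList := by simpa using hm
    have hno : c ∉ (PySem.Set.ofList (pvChanPart item).toList).filter
        (fun ch => pvDigits.contains ch) := by
      intro h
      exact hm' ((PySem.Set.mem_ofList _ _).mp (List.mem_of_mem_filter h))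
    simp [List.count_eq_zero.mpr hno]
  · have hm' : c ∈ (pvChanPart item).toList := by simpa using hm
    have hmem : c ∈ (PySem.Set.ofList (pvChanPart item).toList).filter
        (fun ch => pvDigits.contains ch) :=
      List.mem_filter.mpr ⟨(PySem.Set.mem_ofList _ _).mpr hm', hc⟩
    have hnd : ((PySem.Set.ofList (pvChanPart item).toList).filter
        (fun ch => pvDigits.contains ch)).Nodup :=
      (PySem.Set.nodup_ofList _).filter _
    simp [List.count_eq_one_of_mem hnd hmem]

-- the whole counter loop: digit c's final count is the number of items containing c
lemma pvOuter_getD (c : Char) (hc : pvDigits.contains c = true)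
    (l : List String) (d : PySem.Dict Char Int) :
    (l.foldl
      (fun d item =>
        (PySem.Set.ofList (pvChanPart item).toList).foldl
          (fun d ch =>
            if pvDigits.contains ch then d.modify ch 0 (· + 1) else d) d) d).getD c 0
      = d.getD c 0 + (l.countP (fun item => (pvChanPart item).toList.contains c) : Int) := by
  induction l generalizing d with
  | nil => simp
  | cons x t ih =>
    simp only [List.foldl_cons]
    rw [ih, pvInner_getD c hc]
    rcases h : (pvChanPart x).toList.contains c with _ | _
    · have h' : c ∉ (pvChanPart x).toList := by simpa using h
      simp [h']
    · have h' : c ∈ (pvChanPart x).toList := by simpa using h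
      simp [h']
      ring

-- one per-digit count on A's side
def pvCnt (d : String) (l : List String) : Int :=
  l.foldl (fun (acc : Int) item => acc + (if PySem.Str.isIn d (pvChanPart item) then 1 else 0)) 0

-- A's five-counter fold computes the five per-digit counts
lemma pvFold_eq (l : List String) (c1 c2 c3 c4 c5 : Int) :
    l.foldl
      (fun (c : Int × Int × Int × Int × Int) item =>
        let p := pvChanPart item
        (c.1 + (if PySem.Str.isIn "1" p then 1 else 0),
         c.2.1 + (if PySem.Str.isIn "2" p then 1 else 0),
         c.2.2.1 + (if PySem.Str.isIn "3" p then 1 else 0),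
         c.2.2.2.1 + (if PySem.Str.isIn "4" p then 1 else 0),
         c.2.2.2.2 + (if PySem.Str.isIn "5" p then 1 else 0)))
      (c1, c2, c3, c4, c5)
      = (c1 + pvCnt "1" l, c2 + pvCnt "2" l, c3 + pvCnt "3" l,
         c4 + pvCnt "4" l, c5 + pvCnt "5" l) := by
  induction l generalizing c1 c2 c3 c4 c5 with
  | nil => simp [pvCnt]
  | cons x t ih =>
    have h : ∀ d, pvCnt d (x :: t)
        = (if PySem.Str.isIn d (pvChanPart x) then 1 else 0) + pvCnt d t := by
      intro d
      simp only [pvCnt, List.foldl_cons]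
      rw [PySem.List.foldl_add, PySem.List.foldl_add]
      ring
    simp only [List.foldl_cons]
    rw [ih]
    simp only [h, Prod.mk.injEq]
    refine ⟨by ring, by ring, by ring, by ring, by ring⟩

-- A's count for one digit character = the count B's dictionary holds for it
lemma pvCnt_eq_countP (c : Char) (l : List String) :
    pvCnt (String.ofList [c]) l = (l.countP (fun item => (pvChanPart item).toList.contains c) : Int) := by
  unfold pvCnt
  rw [PySem.List.foldl_add]
  rw [PySem.List.sum_map_ite_one_zero, zero_add]
  congr 1
  apply List.countP_congr
  intro x _
  rw [pvIsIn_single]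

-- ===== VERDICT (by name: the statement is the Claim_ definition above) =====
theorem get_stream_supportChannelNum_spec : Claim_equal_get_stream_supportChannelNum := by
  intro a_list _ _
  unfold Spec_get_stream_supportChannelNum get_stream_supportChannelNum get_stream_supportChannelNum_alt
  rw [pvFold_eq]
  rw [show ∀ (f : Char → String × Int), pvDigits.map f = [f '1', f '2', f '3', f '4', f '5']
        from fun _ => rfl]
  rw [pvOuter_getD '1' (by decide), pvOuter_getD '2' (by decide), pvOuter_getD '3' (by decide),
      pvOuter_getD '4' (by decide), pvOuter_getD '5' (by decide)]
  simp only [PySem.Dict.getD_empty, zero_add]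
  have h1 := pvCnt_eq_countP '1' a_list
  have h2 := pvCnt_eq_countP '2' a_list
  have h3 := pvCnt_eq_countP '3' a_list
  have h4 := pvCnt_eq_countP '4' a_list
  have h5 := pvCnt_eq_countP '5' a_list
  simp only [show String.ofList ['1'] = "1" from rfl, show String.ofList ['2'] = "2" from rfl,
    show String.ofList ['3'] = "3" from rfl, show String.ofList ['4'] = "4" from rfl,
    show String.ofList ['5'] = "5" from rfl] at h1 h2 h3 h4 h5
  simp [h1, h2, h3, h4, h5]
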